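-- pv_equiv track=rewrite | github.com/danroblewis/evident | runtime/src/executor.py | _advance_state
-- ===== SOURCE A (Python) =====
-- from typing import Any
--
-- def _advance_state(
--                    bindings: dict,
--                    state_pairs: dict) -> dict[str, dict]:
--     """
--     Extract next-state values from bindings and return updated current-state
--     dicts keyed by base variable name.
--     """
--     new_states: dict[str, dict] = {}
--     for base_var, (next_var, _type) in state_pairs.items():
--         new_state: dict[str, Any] = {}
--         prefix = f'{next_var}.'
--         for key, val in bindings.items():
--             if key.startswith(prefix):
--                 field = key[len(prefix):]
--                 # Strip sequence/string display artefacts — keep raw values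
--                 new_state[field] = val
--         new_states[base_var] = new_state
--     return new_states
-- ===== SOURCE B (Python) =====
-- def _advance_state(bindings: dict, state_pairs: dict) -> dict:
--     """One pass over bindings: index every 'prefix.field' split of each key
--     into groups, then look each next_var up once per state pair."""
--     groups: dict = {}
--     for key, val in bindings.items():
--         for i, ch in enumerate(key):
--             if ch == '.':
--                 groups.setdefault(key[:i], {})[key[i + 1:]] = val
--     return {base_var: dict(groups.get(next_var, ()))
--             for base_var, (next_var, _type) in state_pairs.items()}
-- ===== Notes on version B (the rewrite author's own statement) =====
-- stated objective: faster
-- what changed: Instead of scanning all bindings once per state pair (testing each key against the pair's prefix), B makes a single pass over the bindings building a prefix->fields index from every dot-split of each key, and then answers each state pair by one dictionary lookup.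
import Mathlib
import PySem

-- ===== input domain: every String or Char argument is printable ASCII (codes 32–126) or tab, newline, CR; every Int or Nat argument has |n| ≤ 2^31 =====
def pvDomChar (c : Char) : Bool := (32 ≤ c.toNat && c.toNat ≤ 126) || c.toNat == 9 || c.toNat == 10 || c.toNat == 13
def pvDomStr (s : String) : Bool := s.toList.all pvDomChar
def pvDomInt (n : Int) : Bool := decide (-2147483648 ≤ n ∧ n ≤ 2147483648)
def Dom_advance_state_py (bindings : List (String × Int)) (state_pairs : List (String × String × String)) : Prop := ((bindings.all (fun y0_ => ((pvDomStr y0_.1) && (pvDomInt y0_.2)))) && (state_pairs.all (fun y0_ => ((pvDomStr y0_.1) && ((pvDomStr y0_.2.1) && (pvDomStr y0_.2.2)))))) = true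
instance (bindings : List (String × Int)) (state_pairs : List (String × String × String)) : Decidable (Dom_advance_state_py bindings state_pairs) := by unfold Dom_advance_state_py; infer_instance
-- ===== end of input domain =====

-- B replaces A's scan of all bindings per state pair by a single indexing pass over the
-- bindings (every dot-split of a key feeds a prefix → fields dictionary) plus one lookup
-- per state pair.

-- ===== PORT A =====
-- literal transliteration of _advance_state: outer loop over state_pairs.items(),
-- inner loop over bindings.items() testing key.startswith(next_var ++ ".");
-- field = key[len(prefix):] (a plain drop, since len(prefix) ≥ 0).
def advance_state_py (bindings : List (String × Int)) (state_pairs : List (String × String × String)) : List (String × List (String × Int)) :=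
  (state_pairs.foldl (fun ns p =>
      let pfx := p.2.1 ++ "."
      let new_state := bindings.foldl (fun st kv =>
          if PySem.Str.startswith kv.1 pfx then
            st.insert (String.ofList (kv.1.toList.drop pfx.toList.length)) kv.2
          else st) PySem.Dict.empty
      ns.insert p.1 new_state)
    (PySem.Dict.empty : PySem.Dict String (PySem.Dict String Int))).items.map
    (fun q => (q.1, q.2.items))

-- ===== PORT B =====
-- pvSplits pre rest walks the key once; (pre, rest-after-dot) are exactly B's
-- (key[:i], key[i+1:]) at each dot position i, in left-to-right order.
def pvSplits : List Char → List Char → List (List Char × List Char)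
  | _, [] => []
  | pre, c :: rest =>
      if c = '.' then (pre, rest) :: pvSplits (pre ++ [c]) rest
      else pvSplits (pre ++ [c]) rest

-- groups.setdefault(prefix, {})[field] = val  is  modify prefix empty (insert field val);
-- dict(groups.get(next_var, ())) is a copy, the identity on the stored value.
def advance_state_py_alt (bindings : List (String × Int)) (state_pairs : List (String × String × String)) : List (String × List (String × Int)) :=
  let groups : PySem.Dict String (PySem.Dict String Int) :=
    bindings.foldl (fun g kv =>
        (pvSplits [] kv.1.toList).foldl (fun g pr =>
            g.modify (String.ofList pr.1) PySem.Dict.empty (fun d => d.insert (String.ofList pr.2) kv.2)) g)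
      PySem.Dict.empty
  (state_pairs.foldl (fun ns p => ns.insert p.1 (groups.getD p.2.1 PySem.Dict.empty))
    (PySem.Dict.empty : PySem.Dict String (PySem.Dict String Int))).items.map
    (fun q => (q.1, q.2.items))

-- ===== PRECONDITION & SPEC =====
def Spec_advance_state_py (bindings : List (String × Int)) (state_pairs : List (String × String × String)) (out : List (String × List (String × Int))) : Prop := out = advance_state_py_alt bindings state_pairs
instance (bindings : List (String × Int)) (state_pairs : List (String × String × String)) (out : List (String × List (String × Int))) : Decidable (Spec_advance_state_py bindings state_pairs out) := by unfold Spec_advance_state_py; infer_instance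

-- ===== CLAIM (what is proved, stated in full; the proofs are below) =====
def Claim_equal_advance_state_py : Prop := ∀ (bindings : List (String × Int)) (state_pairs : List (String × String × String)), Dom_advance_state_py bindings state_pairs → Spec_advance_state_py bindings state_pairs (advance_state_py bindings state_pairs)

-- ===== LEMMAS AND PROOFS =====

theorem pvSplits_eq_map (pre rest : List Char) :
    pvSplits pre rest = (pvSplits [] rest).map (fun pr => (pre ++ pr.1, pr.2)) := by
  induction rest generalizing pre with
  | nil => simp [pvSplits]
  | cons c r ih =>
    simp only [pvSplits, List.nil_append]
    rw [ih (pre ++ [c]), ih [c]]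
    by_cases h : c = '.' <;> simp [h, Function.comp]

theorem filter_pvSplits (k nv : List Char) :
    (pvSplits [] k).filter (fun pr => pr.1 == nv) =
      if (nv ++ ['.']) <+: k then [(nv, k.drop (nv.length + 1))] else [] := by
  induction k generalizing nv with
  | nil => simp [pvSplits]
  | cons c r ih =>
    simp only [pvSplits, List.nil_append]
    rw [pvSplits_eq_map [c] r]
    cases nv with
    | nil =>
      by_cases h : c = '.'
      · subst h
        simp [List.filter_map, Function.comp,
          List.filter_eq_nil_iff]
      · simp [h, List.filter_map, Function.comp, List.filter_eq_nil_iff,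
          List.cons_prefix_cons, Ne.symm h]
    | cons d nv' =>
      have hmap : List.filter (fun pr => pr.1 == d :: nv')
          ((pvSplits [] r).map (fun pr => ([c] ++ pr.1, pr.2))) =
          if c = d then ((pvSplits [] r).filter (fun pr => pr.1 == nv')).map
            (fun pr => ([c] ++ pr.1, pr.2)) else [] := by
        rw [List.filter_map]
        by_cases hc : c = d
        · subst hc
          rw [if_pos rfl]
          congr 1
          apply List.filter_congr
          intro pr _
          simp [Function.comp]
        · rw [if_neg hc, List.map_eq_nil_iff.2]
          rw [List.filter_eq_nil_iff]
          intro pr _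
          simp [Function.comp, hc]
      by_cases h : c = '.'
      · subst h
        rw [if_pos rfl, List.filter_cons_of_neg (by simp), hmap]
        by_cases hc : '.' = d
        · rw [if_pos hc, ih nv']
          subst hc
          by_cases hp : nv' ++ ['.'] <+: r <;>
            simp [hp, List.cons_prefix_cons]
        · rw [if_neg hc]
          rw [if_neg (by simp [List.cons_prefix_cons]; intro hd; exact fun _ => hc hd.symm)]
      · rw [if_neg h, hmap]
        by_cases hc : c = d
        · rw [if_pos hc, ih nv']
          subst hc
          by_cases hp : nv' ++ ['.'] <+: r <;>
            simp [hp, List.cons_prefix_cons]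
        · rw [if_neg hc]
          rw [if_neg (by simp [List.cons_prefix_cons]; intro hd; exact fun _ => hc hd.symm)]

theorem getD_foldl_modify (l : List (List Char × List Char)) (v : Int)
    (g : PySem.Dict String (PySem.Dict String Int)) (nv : String) :
    (l.foldl (fun g pr => g.modify (String.ofList pr.1) PySem.Dict.empty
        (fun d => d.insert (String.ofList pr.2) v)) g).getD nv PySem.Dict.empty =
      (l.filter (fun pr => pr.1 == nv.toList)).foldl
        (fun st pr => st.insert (String.ofList pr.2) v) (g.getD nv PySem.Dict.empty) := by
  induction l generalizing g with
  | nil => rfl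
  | cons pr l ih =>
    simp only [List.foldl_cons, List.filter_cons]
    by_cases h : pr.1 = nv.toList
    · have hk : String.ofList pr.1 = nv := by
        rw [h]; exact String.ofList_toList
      rw [if_pos (by simp [h]), List.foldl_cons, ih, hk,
        PySem.Dict.getD_modify_self]
    · have hk : nv ≠ String.ofList pr.1 := by
        intro he; exact h (by rw [he]; simp)
      rw [if_neg (by simp [h]), ih, PySem.Dict.getD_modify_of_ne (hne := hk)]

theorem step_eq (k : String) (v : Int) (g : PySem.Dict String (PySem.Dict String Int)) (nv : String) :
    ((pvSplits [] k.toList).foldl (fun g pr => g.modify (String.ofList pr.1) PySem.Dict.empty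
        (fun d => d.insert (String.ofList pr.2) v)) g).getD nv PySem.Dict.empty =
      (if PySem.Str.startswith k (nv ++ ".") then
        (g.getD nv PySem.Dict.empty).insert (String.ofList (k.toList.drop ((nv ++ ".").toList.length))) v
      else g.getD nv PySem.Dict.empty) := by
  rw [getD_foldl_modify, filter_pvSplits]
  have hsw : PySem.Str.startswith k (nv ++ ".") = true ↔ (nv.toList ++ ['.']) <+: k.toList := by
    rw [PySem.Str.startswith_eq]
    have h2 : (nv ++ ".").toList = nv.toList ++ ['.'] := by simp
    rw [h2, PySem.Chars.startswith_iff]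
  by_cases hp : (nv.toList ++ ['.']) <+: k.toList
  · rw [if_pos hp, if_pos (hsw.2 hp)]
    simp
  · rw [if_neg hp, if_neg (fun hh => hp (hsw.1 hh))]
    rfl

theorem groups_getD (bindings : List (String × Int))
    (g : PySem.Dict String (PySem.Dict String Int)) (nv : String) :
    (bindings.foldl (fun g kv =>
        (pvSplits [] kv.1.toList).foldl (fun g pr => g.modify (String.ofList pr.1) PySem.Dict.empty
          (fun d => d.insert (String.ofList pr.2) kv.2)) g) g).getD nv PySem.Dict.empty =
      bindings.foldl (fun st kv =>
          if PySem.Str.startswith kv.1 (nv ++ ".") then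
            st.insert (String.ofList (kv.1.toList.drop (nv ++ ".").toList.length)) kv.2
          else st) (g.getD nv PySem.Dict.empty) := by
  induction bindings generalizing g with
  | nil => rfl
  | cons kv bs ih =>
    simp only [List.foldl_cons]
    rw [ih, step_eq]

theorem pv_final (bindings : List (String × Int)) (state_pairs : List (String × String × String)) :
  (state_pairs.foldl (fun ns p =>
      let pfx := p.2.1 ++ "."
      let new_state := bindings.foldl (fun st kv =>
          if PySem.Str.startswith kv.1 pfx then
            st.insert (String.ofList (kv.1.toList.drop pfx.toList.length)) kv.2
          else st) PySem.Dict.empty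
      ns.insert p.1 new_state)
    (PySem.Dict.empty : PySem.Dict String (PySem.Dict String Int))).items.map
    (fun q => (q.1, q.2.items)) =
  (let groups : PySem.Dict String (PySem.Dict String Int) :=
    bindings.foldl (fun g kv =>
        (pvSplits [] kv.1.toList).foldl (fun g pr =>
            g.modify (String.ofList pr.1) PySem.Dict.empty (fun d => d.insert (String.ofList pr.2) kv.2)) g)
      PySem.Dict.empty
  (state_pairs.foldl (fun ns p => ns.insert p.1 (groups.getD p.2.1 PySem.Dict.empty))
    (PySem.Dict.empty : PySem.Dict String (PySem.Dict String Int))).items.map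
    (fun q => (q.1, q.2.items))) := by
  simp only []
  congr 1
  congr 1
  simp only [groups_getD, PySem.Dict.getD_empty]

-- ===== VERDICT (by name: the statement is the Claim_ definition above) =====
theorem advance_state_py_spec : Claim_equal_advance_state_py := by
  intro bindings state_pairs _
  unfold Spec_advance_state_py advance_state_py advance_state_py_alt
  exact pv_final bindings state_pairs
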